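-- pv_equiv track=rewrite | github.com/adamhstewart/xp-bot | bot_old.py | get_level_and_progress
-- ===== SOURCE A (Python) =====
-- LEVEL_THRESHOLDS = [
--     0, 300, 900, 2700, 6500, 14000, 23000, 34000, 48000, 64000,
--     85000, 100000, 120000, 140000, 165000, 195000, 225000, 265000, 305000, 355000
-- ]
--
-- def get_level_and_progress(xp):
--     level = 1
--     for i, threshold in enumerate(LEVEL_THRESHOLDS):
--         if xp < threshold:
--             level = i
--             break
--     else:
--         level = 20
--
--     if level == 20:
--         return level, None, None
--
--     current_threshold = LEVEL_THRESHOLDS[level - 1]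
--     next_threshold = LEVEL_THRESHOLDS[level]
--     progress = xp - current_threshold
--     required = next_threshold - current_threshold
--     return level, progress, required
-- ===== SOURCE B (Python) =====
-- LEVEL_THRESHOLDS = [
--     0, 300, 900, 2700, 6500, 14000, 23000, 34000, 48000, 64000,
--     85000, 100000, 120000, 140000, 165000, 195000, 225000, 265000, 305000, 355000
-- ]
--
-- def get_level_and_progress(xp):
--     # binary search for the first threshold strictly greater than xp (bisect_right)
--     lo, hi = 0, len(LEVEL_THRESHOLDS)
--     while lo < hi:
--         mid = (lo + hi) // 2
--         if LEVEL_THRESHOLDS[mid] <= xp: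
--             lo = mid + 1
--         else:
--             hi = mid
--     level = lo
--     if level == 20:
--         return level, None, None
--     current_threshold = LEVEL_THRESHOLDS[level - 1]
--     return level, xp - current_threshold, LEVEL_THRESHOLDS[level] - current_threshold
-- ===== Notes on version B (the rewrite author's own statement) =====
-- stated objective: alternative
-- what changed: Replaces A's linear for/else scan over LEVEL_THRESHOLDS with a hand-written bisect_right binary search (lo/hi loop) that finds the first threshold strictly greater than xp, keeping the identical post-logic including Python's negative-index behavior at level 0.
import Mathlib
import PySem

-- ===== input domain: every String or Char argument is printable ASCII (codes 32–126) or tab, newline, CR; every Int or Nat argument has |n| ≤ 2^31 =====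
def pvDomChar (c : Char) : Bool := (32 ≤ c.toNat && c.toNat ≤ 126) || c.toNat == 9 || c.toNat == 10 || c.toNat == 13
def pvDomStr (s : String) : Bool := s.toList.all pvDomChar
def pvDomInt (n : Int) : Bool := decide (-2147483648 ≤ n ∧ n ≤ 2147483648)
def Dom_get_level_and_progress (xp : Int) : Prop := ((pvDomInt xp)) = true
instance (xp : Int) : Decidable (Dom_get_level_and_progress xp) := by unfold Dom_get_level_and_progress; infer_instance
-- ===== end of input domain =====

-- B replaces A's linear scan over the thresholds by a hand-written binary search
-- (bisect_right); same return value, no side effects (objective: alternative).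

def LEVEL_THRESHOLDS : List Int :=
  [0, 300, 900, 2700, 6500, 14000, 23000, 34000, 48000, 64000,
   85000, 100000, 120000, 140000, 165000, 195000, 225000, 265000, 305000, 355000]

-- ===== PORT A =====
-- the for/else loop: first index i with xp < LEVEL_THRESHOLDS[i], else 20
def pvScanLevel (xp : Int) : List (Int × Int) → Int
  | [] => 20
  | (i, t) :: rest => if xp < t then i else pvScanLevel xp rest

def get_level_and_progress (xp : Int) : Int × Option Int × Option Int :=
  let level := pvScanLevel xp (PySem.List.enumerate LEVEL_THRESHOLDS 0)
  if level = 20 then (level, none, none)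
  else
    -- LEVEL_THRESHOLDS[level-1] / [level]: Python indexing (a negative index wraps);
    -- both are always in range here, so the `none` (IndexError) default is unreachable
    let current := (PySem.List.pyGet? LEVEL_THRESHOLDS (level - 1)).getD 0
    let next := (PySem.List.pyGet? LEVEL_THRESHOLDS level).getD 0
    (level, some (xp - current), some (next - current))

-- ===== PORT B =====
-- hand-written bisect_right loop of Source B (indices are Nat: always non-negative, in range)
def pvBisect (xp : Int) (lo hi : Nat) : Nat :=
  if _h : lo < hi then
    let mid := (lo + hi) / 2
    if LEVEL_THRESHOLDS.getD mid 0 ≤ xp then pvBisect xp (mid + 1) hi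
    else pvBisect xp lo mid
  else lo
termination_by hi - lo
decreasing_by all_goals omega

def get_level_and_progress_alt (xp : Int) : Int × Option Int × Option Int :=
  let level : Int := (pvBisect xp 0 LEVEL_THRESHOLDS.length : Int)
  if level = 20 then (level, none, none)
  else
    let current := (PySem.List.pyGet? LEVEL_THRESHOLDS (level - 1)).getD 0
    let next := (PySem.List.pyGet? LEVEL_THRESHOLDS level).getD 0
    (level, some (xp - current), some (next - current))

-- ===== PRECONDITION & SPEC =====
def Spec_get_level_and_progress (xp : Int) (out : Int × Option Int × Option Int) : Prop := out = get_level_and_progress_alt xp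
instance (xp : Int) (out : Int × Option Int × Option Int) : Decidable (Spec_get_level_and_progress xp out) := by unfold Spec_get_level_and_progress; infer_instance

-- ===== CLAIM (what is proved, stated in full; the proofs are below) =====
def Claim_equal_get_level_and_progress : Prop := ∀ (xp : Int), Dom_get_level_and_progress xp → Spec_get_level_and_progress xp (get_level_and_progress xp)

-- ===== LEMMAS AND PROOFS =====

-- both loops return the unique r with: thresholds below r are ≤ xp, and (if r < 20) xp < T[r]
def pvLevelP (xp r : Int) : Prop :=
  0 ≤ r ∧ r ≤ 20 ∧ (∀ i : Nat, (i : Int) < r → LEVEL_THRESHOLDS.getD i 0 ≤ xp) ∧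
    (r < 20 → xp < LEVEL_THRESHOLDS.getD r.toNat 0)

theorem pvLevelP_unique (xp r r' : Int) (h : pvLevelP xp r) (h' : pvLevelP xp r') : r = r' := by
  obtain ⟨h0, h20, hlo, hhi⟩ := h
  obtain ⟨h0', h20', hlo', hhi'⟩ := h'
  by_contra hne
  rcases lt_or_gt_of_ne hne with hlt | hlt
  · have := hlo' r.toNat (by omega)
    have := hhi (by omega)
    omega
  · have := hlo r'.toNat (by omega)
    have := hhi' (by omega)
    omega

theorem pvT_length : LEVEL_THRESHOLDS.length = 20 := by decide

theorem pvT_sorted : ∀ i < 20, ∀ j < 20, i ≤ j →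
    LEVEL_THRESHOLDS.getD i 0 ≤ LEVEL_THRESHOLDS.getD j 0 := by decide

-- A's loop satisfies the characterization
theorem pvScan_post (xp : Int) : ∀ (l : List Int) (k : Nat),
    LEVEL_THRESHOLDS.drop k = l →
    (∀ i : Nat, i < k → LEVEL_THRESHOLDS.getD i 0 ≤ xp) →
    pvLevelP xp (pvScanLevel xp (PySem.List.enumerate l (k : Int))) := by
  intro l
  induction l with
  | nil =>
    intro k hdrop hinv
    have hk : 20 ≤ k := by
      have := congrArg List.length hdrop
      simp [pvT_length] at this
      omega
    simp only [PySem.List.enumerate_nil, pvScanLevel]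
    exact ⟨by omega, by omega, fun i hi => hinv i (by omega), by omega⟩
  | cons t rest ih =>
    intro k hdrop hinv
    have hk : k < 20 := by
      have := congrArg List.length hdrop
      simp [pvT_length] at this
      omega
    have hget : LEVEL_THRESHOLDS.getD k 0 = t := by
      have h1 := congrArg List.head? hdrop
      rw [List.head?_drop] at h1
      simp at h1
      simp [List.getD_eq_getElem?_getD, h1]
    have hrest : LEVEL_THRESHOLDS.drop (k + 1) = rest := by
      have h2 := congrArg List.tail hdrop
      simpa [List.tail_drop] using h2
    rw [PySem.List.enumerate_cons]
    simp only [pvScanLevel]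
    by_cases hxp : xp < t
    · rw [if_pos hxp]
      refine ⟨by omega, by omega, fun i hi => hinv i (by omega), fun _ => ?_⟩
      rw [Int.toNat_natCast, hget]
      exact hxp
    · rw [if_neg hxp]
      have hinv' : ∀ i : Nat, i < k + 1 → LEVEL_THRESHOLDS.getD i 0 ≤ xp := by
        intro i hi
        rcases Nat.lt_or_ge i k with h | h
        · exact hinv i h
        · have he : i = k := by omega
          rw [he, hget]; omega
      have hcast : ((k : Int) + 1) = ((k + 1 : Nat) : Int) := by push_cast; ring
      rw [hcast]
      exact ih (k + 1) hrest hinv'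

-- B's binary search maintains the bisect_right invariant
theorem pvBisect_post (xp : Int) : ∀ (n lo hi : Nat), hi - lo ≤ n → lo ≤ hi → hi ≤ 20 →
    (∀ i : Nat, i < lo → LEVEL_THRESHOLDS.getD i 0 ≤ xp) →
    (∀ i : Nat, hi ≤ i → i < 20 → xp < LEVEL_THRESHOLDS.getD i 0) →
    lo ≤ pvBisect xp lo hi ∧ pvBisect xp lo hi ≤ hi ∧
    (∀ i : Nat, i < pvBisect xp lo hi → LEVEL_THRESHOLDS.getD i 0 ≤ xp) ∧
    (∀ i : Nat, pvBisect xp lo hi ≤ i → i < 20 → xp < LEVEL_THRESHOLDS.getD i 0) := by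
  intro n
  induction n with
  | zero =>
    intro lo hi hn hle h20 hlo hhi
    have : ¬ lo < hi := by omega
    rw [pvBisect, dif_neg this]
    exact ⟨le_refl _, hle, hlo, fun i h1 h2 => hhi i (by omega) h2⟩
  | succ n ih =>
    intro lo hi hn hle h20 hlo hhi
    by_cases h : lo < hi
    · rw [pvBisect, dif_pos h]
      have hmid1 : lo ≤ (lo + hi) / 2 := by omega
      have hmid2 : (lo + hi) / 2 < hi := by omega
      by_cases hc : LEVEL_THRESHOLDS.getD ((lo + hi) / 2) 0 ≤ xp
      · simp only [hc, if_true]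
        have := ih ((lo + hi) / 2 + 1) hi (by omega) (by omega) h20
          (by
            intro i hi'
            exact le_trans (pvT_sorted i (by omega) ((lo + hi) / 2) (by omega) (by omega)) hc)
          hhi
        exact ⟨by omega, this.2.1, this.2.2⟩
      · simp only [hc, if_false]
        have := ih lo ((lo + hi) / 2) (by omega) (by omega) (by omega) hlo
          (by
            intro i h1 h2
            exact lt_of_lt_of_le (by omega) (pvT_sorted ((lo + hi) / 2) (by omega) i h2 h1))
        exact ⟨this.1, by omega, this.2.2⟩
    · rw [pvBisect, dif_neg h]
      exact ⟨le_refl _, by omega, hlo, fun i h1 h2 => hhi i (by omega) h2⟩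

theorem pvLevel_eq (xp : Int) :
    pvScanLevel xp (PySem.List.enumerate LEVEL_THRESHOLDS 0)
      = (pvBisect xp 0 LEVEL_THRESHOLDS.length : Int) := by
  have hA : pvLevelP xp (pvScanLevel xp (PySem.List.enumerate LEVEL_THRESHOLDS 0)) := by
    have := pvScan_post xp LEVEL_THRESHOLDS 0 (by simp) (by omega)
    simpa using this
  have hB : pvLevelP xp ((pvBisect xp 0 LEVEL_THRESHOLDS.length : Nat) : Int) := by
    have h := pvBisect_post xp 20 0 20 (by omega) (by omega) (by omega) (by omega) (by omega)
    rw [pvT_length]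
    refine ⟨by omega, by exact_mod_cast h.2.1, ?_, ?_⟩
    · intro i hi; exact h.2.2.1 i (by exact_mod_cast hi)
    · intro hr
      have := h.2.2.2 (pvBisect xp 0 20) (le_refl _) (by omega)
      simpa using this
  exact pvLevelP_unique xp _ _ hA hB

-- ===== VERDICT (by name: the statement is the Claim_ definition above) =====
theorem get_level_and_progress_spec : Claim_equal_get_level_and_progress := by
  intro xp _
  unfold Spec_get_level_and_progress get_level_and_progress get_level_and_progress_alt
  rw [pvLevel_eq]
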